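-- pv_equiv track=rewrite | github.com/NeoZorK/neozork-hld-prediction | src/plotting/dual_chart_plot.py | is_dual_chart_rule
-- ===== SOURCE A (Python) =====
-- def is_dual_chart_rule(rule: str) -> bool:
--     """
--     Check if the rule should trigger dual chart mode.
--
--     Args:
--         rule (str): Rule string (e.g., 'rsi:14,30,70,open')
--
--     Returns:
--         bool: True if rule should use dual chart mode
--     """
--     if not rule:
--         return False
--
--     # Special case for SCHR_DIR (no parameters but should use dual chart)
--     if rule.lower().strip() == 'schr_dir':
--         return True
--
--     # Check for parameterized indicators (containing ':')
--     if ':' not in rule: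
--         return False
--
--     # Extract indicator name
--     indicator_name = rule.split(':', 1)[0].lower().strip()
--
--     # Excluded indicators that should not use dual chart
--     excluded_indicators = {
--         'ohlcv', 'auto', 'pv', 'sr', 'phld', 'pressure_vector',
--         'support_resistants', 'predict_high_low_direction'
--     }
--
--     if indicator_name in excluded_indicators:
--         return False
--
--     # Check if indicator is supported
--     supported_indicators = get_supported_indicators()
--
--     if indicator_name not in supported_indicators:
--         return False
--
--     # Basic parameter validation for common indicators
--     try:
--         params_str = rule.split(':', 1)[1].strip()
--         params = [p.strip() for p in params_str.split(',')]
--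
--         if indicator_name in ['rsi', 'rsi_mom', 'rsi_div']:
--             if len(params) < 4:
--                 return False
--             # Check if first 3 parameters are numeric
--             int(params[0])  # period
--             float(params[1])  # oversold
--             float(params[2])  # overbought
--             if params[3].lower() not in ['open', 'close']:
--                 return False
--         elif indicator_name == 'macd':
--             if len(params) < 4:
--                 return False
--             # Check if first 3 parameters are numeric
--             int(params[0])  # fast_period
--             int(params[1])  # slow_period
--             int(params[2])  # signal_period
--             if params[3].lower() not in ['open', 'close']:
--                 return False
--         elif indicator_name == 'ema':
--             if len(params) < 2:
--                 return False
--             int(params[0])  # period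
--             if params[1].lower() not in ['open', 'close']:
--                 return False
--         elif indicator_name == 'bb':
--             if len(params) < 3:
--                 return False
--             int(params[0])  # period
--             float(params[1])  # std_dev
--             if params[2].lower() not in ['open', 'close']:
--                 return False
--     except (ValueError, IndexError):
--         return False
--
--     return True
--
-- def get_supported_indicators() -> set:
--     """
--     Get set of supported indicators for dual chart mode.
--
--     Returns:
--         set: Set of supported indicator names
--     """
--     return {
--         'rsi', 'rsi_mom', 'rsi_div', 'macd', 'stoch', 'ema', 'bb', 'atr',
--         'cci', 'vwap', 'pivot', 'hma', 'tsf', 'monte', 'kelly', 'putcallratio', 'cot', 'feargreed', 'fg', 'donchain',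
--         'fibo', 'obv', 'stdev', 'adx', 'sar', 'supertrend', 'schr_rost', 'schr_trend', 'schr_wave2'
--     }
-- ===== SOURCE B (Python) =====
-- # Table-driven re-implementation: per-indicator parser lists replace the elif chain.
-- _EXCLUDED = frozenset({
--     'ohlcv', 'auto', 'pv', 'sr', 'phld', 'pressure_vector',
--     'support_resistants', 'predict_high_low_direction'
-- })
--
-- _SUPPORTED = frozenset({
--     'rsi', 'rsi_mom', 'rsi_div', 'macd', 'stoch', 'ema', 'bb', 'atr',
--     'cci', 'vwap', 'pivot', 'hma', 'tsf', 'monte', 'kelly', 'putcallratio', 'cot', 'feargreed', 'fg', 'donchain',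
--     'fibo', 'obv', 'stdev', 'adx', 'sar', 'supertrend', 'schr_rost', 'schr_trend', 'schr_wave2'
-- })
--
-- # indicator -> positional parsers; the parameter at index len(parsers) must be open/close
-- _VALIDATORS = {
--     'rsi': (int, float, float),
--     'rsi_mom': (int, float, float),
--     'rsi_div': (int, float, float),
--     'macd': (int, int, int),
--     'ema': (int,),
--     'bb': (int, float),
-- }
--
--
-- def is_dual_chart_rule(rule: str) -> bool:
--     if not rule:
--         return False
--     if rule.lower().strip() == 'schr_dir':
--         return True
--     if ':' not in rule:
--         return False
--     name = rule.split(':', 1)[0].lower().strip()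
--     if name in _EXCLUDED:
--         return False
--     if name not in _SUPPORTED:
--         return False
--     parsers = _VALIDATORS.get(name)
--     if parsers is None:
--         return True
--     params = [p.strip() for p in rule.split(':', 1)[1].strip().split(',')]
--     if len(params) < len(parsers) + 1:
--         return False
--     try:
--         for parse, value in zip(parsers, params):
--             parse(value)
--     except ValueError:
--         return False
--     return params[len(parsers)].lower() in ('open', 'close')
-- ===== Notes on version B (the rewrite author's own statement) =====
-- stated objective: simpler
-- what changed: Replaces A's per-indicator elif chain of hand-written length/int/float/direction checks with a validation table mapping each validated indicator to its list of per-position parser callables, applied by one generic length-check + zip loop + direction test.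
import Mathlib
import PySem

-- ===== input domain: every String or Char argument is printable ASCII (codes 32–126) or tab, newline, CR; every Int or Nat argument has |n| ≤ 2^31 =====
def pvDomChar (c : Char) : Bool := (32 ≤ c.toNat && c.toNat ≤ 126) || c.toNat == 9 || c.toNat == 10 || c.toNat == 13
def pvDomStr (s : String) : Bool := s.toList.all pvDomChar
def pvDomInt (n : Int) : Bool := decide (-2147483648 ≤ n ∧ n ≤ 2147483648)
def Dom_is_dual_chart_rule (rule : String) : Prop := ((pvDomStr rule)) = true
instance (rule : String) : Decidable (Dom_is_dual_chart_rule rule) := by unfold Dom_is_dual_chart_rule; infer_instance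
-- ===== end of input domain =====

-- B replaces A's per-indicator elif chain with a table mapping each validated indicator to
-- its list of per-position parsers (objective: simpler).

-- ===== shared builtin models (PySem has no float(); modelled by hand, exact on ASCII) =====

-- int(s) succeeds (value discarded by both Pythons)
def pvIntOk (cs : List Char) : Bool := (PySem.Int.ofChars? cs).isSome

-- rest of a Python digitpart after its first digit: consumes digit | '_' digit, greedily.
-- Exact on ASCII: Python allows a single '_' only between two digits.
def pvDigitsRest : List Char → List Char
  | [] => []
  | c :: rest =>
    if PySem.Chars.isdigit c then pvDigitsRest rest
    else if c = '_' then
      match rest with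
      | [] => [c]
      | d :: rest' => if PySem.Chars.isdigit d then pvDigitsRest rest' else c :: d :: rest'
    else c :: rest
  termination_by cs => cs.length
  decreasing_by all_goals simp

-- parse one Python digitpart; none if no leading digit, else the remaining characters
def pvDigitpart? : List Char → Option (List Char)
  | [] => none
  | c :: rest => if PySem.Chars.isdigit c then some (pvDigitsRest rest) else none

-- float(s) succeeds (value discarded).  Hand port of CPython's float_repr grammar,
-- exact on the ASCII domain (checked against CPython by fuzzing):
-- strip ws, optional sign, then inf|infinity|nan (case-insens.) or
-- (digitpart ['.' [digitpart]] | '.' digitpart) [ (e|E) [sign] digitpart ], all consumed.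
def pvFloatOk (cs : List Char) : Bool :=
  let s := PySem.Chars.strip cs
  let s1 := match s with
            | c :: rest => if c = '+' ∨ c = '-' then rest else s
            | [] => []
  if PySem.Chars.lower s1 = "inf".toList ∨ PySem.Chars.lower s1 = "infinity".toList ∨
     PySem.Chars.lower s1 = "nan".toList then true
  else
    let afterMant : Option (List Char) :=
      match pvDigitpart? s1 with
      | some r =>
        match r with
        | '.' :: r2 => some ((pvDigitpart? r2).getD r2)
        | _ => some r
      | none =>
        match s1 with
        | '.' :: r2 => pvDigitpart? r2
        | _ => none
    match afterMant with
    | none => false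
    | some [] => true
    | some (c :: r2) =>
      if c = 'e' ∨ c = 'E' then
        let r3 := match r2 with
                  | c2 :: rr => if c2 = '+' ∨ c2 = '-' then rr else r2
                  | [] => []
        match pvDigitpart? r3 with
        | some [] => true
        | _ => false
      else false

def pvExcluded : List (List Char) :=
  ["ohlcv".toList, "auto".toList, "pv".toList, "sr".toList, "phld".toList,
   "pressure_vector".toList, "support_resistants".toList, "predict_high_low_direction".toList]

def pvSupported : List (List Char) :=
  ["rsi".toList, "rsi_mom".toList, "rsi_div".toList, "macd".toList, "stoch".toList,
   "ema".toList, "bb".toList, "atr".toList, "cci".toList, "vwap".toList, "pivot".toList,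
   "hma".toList, "tsf".toList, "monte".toList, "kelly".toList, "putcallratio".toList,
   "cot".toList, "feargreed".toList, "fg".toList, "donchain".toList, "fibo".toList,
   "obv".toList, "stdev".toList, "adx".toList, "sar".toList, "supertrend".toList,
   "schr_rost".toList, "schr_trend".toList, "schr_wave2".toList]

-- ===== PORT A =====
-- A's per-indicator elif chain (params[i] is guarded by the length check, so getD is exact)
def pvCheckA (name : List Char) (paramsStr : List Char) : Bool :=
  let params := (PySem.Chars.splitOn (PySem.Chars.strip paramsStr) [',']).map PySem.Chars.strip
  if name = "rsi".toList ∨ name = "rsi_mom".toList ∨ name = "rsi_div".toList then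
    if params.length < 4 then false
    else if ¬ pvIntOk (params.getD 0 []) then false
    else if ¬ pvFloatOk (params.getD 1 []) then false
    else if ¬ pvFloatOk (params.getD 2 []) then false
    else if ¬ (PySem.Chars.lower (params.getD 3 []) ∈ ["open".toList, "close".toList]) then false
    else true
  else if name = "macd".toList then
    if params.length < 4 then false
    else if ¬ pvIntOk (params.getD 0 []) then false
    else if ¬ pvIntOk (params.getD 1 []) then false
    else if ¬ pvIntOk (params.getD 2 []) then false
    else if ¬ (PySem.Chars.lower (params.getD 3 []) ∈ ["open".toList, "close".toList]) then false
    else true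
  else if name = "ema".toList then
    if params.length < 2 then false
    else if ¬ pvIntOk (params.getD 0 []) then false
    else if ¬ (PySem.Chars.lower (params.getD 1 []) ∈ ["open".toList, "close".toList]) then false
    else true
  else if name = "bb".toList then
    if params.length < 3 then false
    else if ¬ pvIntOk (params.getD 0 []) then false
    else if ¬ pvFloatOk (params.getD 1 []) then false
    else if ¬ (PySem.Chars.lower (params.getD 2 []) ∈ ["open".toList, "close".toList]) then false
    else true
  else true

def is_dual_chart_rule (rule : String) : Bool :=
  let cs := rule.toList
  if cs = [] then false
  else if PySem.Chars.strip (PySem.Chars.lower cs) = "schr_dir".toList then true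
  else if PySem.Chars.isIn [':'] cs = false then false
  else
    let parts := PySem.Chars.splitOnMax cs [':'] 1
    let name := PySem.Chars.strip (PySem.Chars.lower (parts.getD 0 []))
    if name ∈ pvExcluded then false
    else if ¬ (name ∈ pvSupported) then false
    else pvCheckA name (parts.getD 1 [])

-- ===== PORT B =====
-- B's validator table: indicator ↦ per-position parser list; params[len(parsers)] must be open/close
def pvValidators : List (List Char × List (List Char → Bool)) :=
  [("rsi".toList, [pvIntOk, pvFloatOk, pvFloatOk]),
   ("rsi_mom".toList, [pvIntOk, pvFloatOk, pvFloatOk]),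
   ("rsi_div".toList, [pvIntOk, pvFloatOk, pvFloatOk]),
   ("macd".toList, [pvIntOk, pvIntOk, pvIntOk]),
   ("ema".toList, [pvIntOk]),
   ("bb".toList, [pvIntOk, pvFloatOk])]

def pvCheckB (name : List Char) (paramsStr : List Char) : Bool :=
  match pvValidators.lookup name with
  | none => true
  | some parsers =>
    let params := (PySem.Chars.splitOn (PySem.Chars.strip paramsStr) [',']).map PySem.Chars.strip
    if params.length < parsers.length + 1 then false
    else
      (parsers.zip params).all (fun pv => pv.1 pv.2) &&
      decide (PySem.Chars.lower (params.getD parsers.length []) ∈ ["open".toList, "close".toList])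

def is_dual_chart_rule_alt (rule : String) : Bool :=
  let cs := rule.toList
  if cs = [] then false
  else if PySem.Chars.strip (PySem.Chars.lower cs) = "schr_dir".toList then true
  else if PySem.Chars.isIn [':'] cs = false then false
  else
    let parts := PySem.Chars.splitOnMax cs [':'] 1
    let name := PySem.Chars.strip (PySem.Chars.lower (parts.getD 0 []))
    if name ∈ pvExcluded then false
    else if ¬ (name ∈ pvSupported) then false
    else pvCheckB name (parts.getD 1 [])

-- ===== PRECONDITION & SPEC =====
def Spec_is_dual_chart_rule (rule : String) (out : Bool) : Prop := out = is_dual_chart_rule_alt rule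
instance (rule : String) (out : Bool) : Decidable (Spec_is_dual_chart_rule rule out) := by unfold Spec_is_dual_chart_rule; infer_instance

-- ===== CLAIM (what is proved, stated in full; the proofs are below) =====
def Claim_equal_is_dual_chart_rule : Prop := ∀ (rule : String), Dom_is_dual_chart_rule rule → Spec_is_dual_chart_rule rule (is_dual_chart_rule rule)

-- ===== LEMMAS AND PROOFS =====

lemma pvCheck_eq (name : List Char) (paramsStr : List Char) :
    pvCheckA name paramsStr = pvCheckB name paramsStr := by
  unfold pvCheckA pvCheckB
  generalize (PySem.Chars.splitOn (PySem.Chars.strip paramsStr) [',']).map PySem.Chars.strip = ps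
  by_cases h1 : name = ['r','s','i']
  · subst h1
    rcases ps with _ | ⟨a, _ | ⟨b, _ | ⟨c, _ | ⟨d, t⟩⟩⟩⟩ <;>
      simp [pvValidators, List.lookup, Bool.and_assoc]
  by_cases h2 : name = ['r','s','i','_','m','o','m']
  · subst h2
    rcases ps with _ | ⟨a, _ | ⟨b, _ | ⟨c, _ | ⟨d, t⟩⟩⟩⟩ <;>
      simp [pvValidators, List.lookup, Bool.and_assoc]
  by_cases h3 : name = ['r','s','i','_','d','i','v']
  · subst h3
    rcases ps with _ | ⟨a, _ | ⟨b, _ | ⟨c, _ | ⟨d, t⟩⟩⟩⟩ <;>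
      simp [pvValidators, List.lookup, Bool.and_assoc]
  by_cases h4 : name = ['m','a','c','d']
  · subst h4
    rcases ps with _ | ⟨a, _ | ⟨b, _ | ⟨c, _ | ⟨d, t⟩⟩⟩⟩ <;>
      simp [pvValidators, List.lookup, Bool.and_assoc]
  by_cases h5 : name = ['e','m','a']
  · subst h5
    rcases ps with _ | ⟨a, _ | ⟨b, t⟩⟩ <;>
      simp [pvValidators, List.lookup, Bool.and_assoc]
  by_cases h6 : name = ['b','b']
  · subst h6
    rcases ps with _ | ⟨a, _ | ⟨b, _ | ⟨c, t⟩⟩⟩ <;>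
      simp [pvValidators, List.lookup, Bool.and_assoc]
  · simp [pvValidators, List.lookup, h1, h2, h3, h4, h5, h6,
          beq_eq_false_iff_ne.mpr h1, beq_eq_false_iff_ne.mpr h2, beq_eq_false_iff_ne.mpr h3,
          beq_eq_false_iff_ne.mpr h4, beq_eq_false_iff_ne.mpr h5, beq_eq_false_iff_ne.mpr h6]

-- ===== VERDICT (by name: the statement is the Claim_ definition above) =====
theorem is_dual_chart_rule_spec : Claim_equal_is_dual_chart_rule := by
  intro rule _
  unfold Spec_is_dual_chart_rule is_dual_chart_rule is_dual_chart_rule_alt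
  simp only [pvCheck_eq]
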